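-- pv_equiv track=rewrite | github.com/adityasaboo10/lut-mapping-optimization | flowmap-r.py | minimalize_cuts
-- ===== SOURCE A (Python) =====
-- from typing import Dict, List, Set, Tuple, Optional
--
-- def minimalize_cuts(cuts: List[Set[str]]) -> List[Set[str]]:
--     """Keep only set‑minimal cuts (remove supersets & duplicates)."""
--     fs = [frozenset(c) for c in cuts]
--     keep: List[Set[str]] = []
--     for i, c in enumerate(fs):
--         dominated = False
--         for j, d in enumerate(fs):
--             if i == j:
--                 continue
--             if d.issubset(c):
--                 if d != c or j < i:
--                     dominated = True
--                     break
--         if not dominated: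
--             keep.append(set(c))
--     out: List[Set[str]] = []
--     seen: Set[frozenset] = set()
--     for c in keep:
--         f = frozenset(c)
--         if f not in seen:
--             out.append(c)
--             seen.add(f)
--     return out
-- ===== SOURCE B (Python) =====
-- def minimalize_cuts(cuts):
--     """Keep only set-minimal cuts (remove supersets & duplicates)."""
--     fs = [frozenset(c) for c in cuts]
--     # 1. deduplicate, remembering each distinct set's first-occurrence index
--     uniq = []
--     for i, f in enumerate(fs):
--         if all(f != g for _, g in uniq):
--             uniq.append((i, f))
--     # 2. sweep in ascending cardinality: a set is minimal iff no already-kept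
--     #    (hence no-larger) set is contained in it
--     kept = []
--     for i, f in sorted(uniq, key=lambda p: len(p[1])):
--         if not any(k.issubset(f) for _, k in kept):
--             kept.append((i, f))
--     # 3. restore original order
--     kept.sort(key=lambda p: p[0])
--     return [set(f) for _, f in kept]
-- ===== Notes on version B (the rewrite author's own statement) =====
-- stated objective: alternative
-- what changed: Instead of testing every cut against every other cut with the j<i tie-break and deduplicating afterwards, B deduplicates first (recording first-occurrence indices), sweeps the unique sets in ascending cardinality keeping a set only if no already-kept set is contained in it, and finally sorts the kept sets back by first-occurrence index.
import Mathlib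
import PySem

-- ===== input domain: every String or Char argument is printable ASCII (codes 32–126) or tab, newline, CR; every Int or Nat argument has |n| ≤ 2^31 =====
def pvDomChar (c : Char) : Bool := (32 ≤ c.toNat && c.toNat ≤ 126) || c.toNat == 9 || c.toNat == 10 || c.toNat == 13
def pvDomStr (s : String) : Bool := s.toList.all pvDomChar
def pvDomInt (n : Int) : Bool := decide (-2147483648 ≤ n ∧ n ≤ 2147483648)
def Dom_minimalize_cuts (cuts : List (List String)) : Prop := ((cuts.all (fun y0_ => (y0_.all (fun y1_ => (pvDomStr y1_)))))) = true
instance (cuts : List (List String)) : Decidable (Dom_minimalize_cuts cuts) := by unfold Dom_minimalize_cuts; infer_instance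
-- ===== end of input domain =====

-- B replaces A's all-pairs subset test (with its j<i tie-break) and trailing dedup pass by:
-- dedup first (keeping first-occurrence indices), sweep the unique sets in ascending
-- cardinality keeping sets with no already-kept subset, then sort back by original index.
-- Objective: alternative decomposition of the same task (no speed claim).

-- ===== PORT A =====
-- Python sets/frozensets are PySem.Set values; 'seen' (a set OF frozensets) is ported by hand
-- as a list of canonical element-lists with set-equality membership — exact, because
-- frozenset equality is equality of elements, and only membership of 'seen' is consumed.
def minimalize_cuts (cuts : List (List String)) : List (List String) :=
  let fs := cuts.map (fun c => PySem.Set.ofList c)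
  let keep := (PySem.List.enumerate fs 0).foldl (fun keep p =>
    -- inner 'for j, d' loop with flag+break = first hit = List.any
    let dominated := (PySem.List.enumerate fs 0).any (fun q =>
      if q.1 == p.1 then false
      else PySem.Set.issubset q.2 p.2 && (!(PySem.Set.equal q.2 p.2) || decide (q.1 < p.1)))
    if dominated then keep else keep ++ [PySem.Set.ofList p.2]) []
  (keep.foldl (fun (acc : List (List String) × List (List String)) c =>
    let f := PySem.Set.ofList c
    if acc.2.any (fun g => PySem.Set.equal g f) then acc
    else (acc.1 ++ [c], acc.2 ++ [f])) ([], [])).1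

-- ===== PORT B =====
def minimalize_cuts_alt (cuts : List (List String)) : List (List String) :=
  let fs := cuts.map (fun c => PySem.Set.ofList c)
  let uniq := (PySem.List.enumerate fs 0).foldl (fun u p =>
    if u.all (fun q => !(PySem.Set.equal p.2 q.2)) then u ++ [p] else u) []
  let kept := (PySem.List.sorted uniq (fun p => PySem.Set.len p.2)).foldl (fun kept p =>
    if kept.any (fun q => PySem.Set.issubset q.2 p.2) then kept else kept ++ [p]) []
  (PySem.List.sorted kept (fun p => p.1)).map (fun p => PySem.Set.ofList p.2)

-- ===== PRECONDITION & SPEC =====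
def Spec_minimalize_cuts (cuts : List (List String)) (out : List (List String)) : Prop := out = minimalize_cuts_alt cuts
instance (cuts : List (List String)) (out : List (List String)) : Decidable (Spec_minimalize_cuts cuts out) := by unfold Spec_minimalize_cuts; infer_instance

-- ===== CLAIM (what is proved, stated in full; the proofs are below) =====
def Claim_equal_minimalize_cuts : Prop := ∀ (cuts : List (List String)), Dom_minimalize_cuts cuts → Spec_minimalize_cuts cuts (minimalize_cuts cuts)

-- ===== LEMMAS AND PROOFS =====

-- the canonical frozenset list and the common characterisation both ports are reduced to
def pvFS (cuts : List (List String)) : List (List String) := cuts.map (fun c => PySem.Set.ofList c)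
def pvE (fs : List (List String)) : List (Int × List String) := PySem.List.enumerate fs 0
-- first occurrence of its set
def pvG1 (fs : List (List String)) (p : Int × List String) : Bool :=
  (pvE fs).all (fun q => !(decide (q.1 < p.1) && PySem.Set.equal q.2 p.2))
-- no strict subset anywhere in fs
def pvG2 (fs : List (List String)) (c : List String) : Bool :=
  fs.all (fun d => !(PySem.Set.issubset d c && !(PySem.Set.equal d c)))
def pvGood (fs : List (List String)) (p : Int × List String) : Bool := pvG2 fs p.2 && pvG1 fs p

-- small facts about Set.equal / Set.issubset
theorem pv_equal_refl (a : List String) : PySem.Set.equal a a = true := by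
  simp [PySem.Set.equal_iff]
theorem pv_equal_symm (a b : List String) : PySem.Set.equal a b = PySem.Set.equal b a := by
  have h : PySem.Set.equal a b = true ↔ PySem.Set.equal b a = true := by
    rw [PySem.Set.equal_iff, PySem.Set.equal_iff]
    exact ⟨fun h x => (h x).symm, fun h x => (h x).symm⟩
  rcases hab : PySem.Set.equal a b <;> rcases hba : PySem.Set.equal b a <;> simp_all
theorem pv_equal_trans {a b c : List String} (h1 : PySem.Set.equal a b = true)
    (h2 : PySem.Set.equal b c = true) : PySem.Set.equal a c = true := by
  rw [PySem.Set.equal_iff] at *; intro x; exact (h1 x).trans (h2 x)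
theorem pv_sub_refl (a : List String) : PySem.Set.issubset a a = true := by
  simp [PySem.Set.issubset_iff]
theorem pv_sub_trans {a b c : List String} (h1 : PySem.Set.issubset a b = true)
    (h2 : PySem.Set.issubset b c = true) : PySem.Set.issubset a c = true := by
  rw [PySem.Set.issubset_iff] at *; exact fun x hx => h2 x (h1 x hx)
theorem pv_sub_of_equal {a b : List String} (h : PySem.Set.equal a b = true) :
    PySem.Set.issubset a b = true := by
  rw [PySem.Set.equal_iff] at h; rw [PySem.Set.issubset_iff]; exact fun x hx => (h x).mp hx
theorem pv_strict_len {a b : List String} (ha : a.Nodup) (hb : b.Nodup)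
    (hsub : PySem.Set.issubset a b = true) (hne : PySem.Set.equal a b = false) :
    PySem.Set.len a < PySem.Set.len b := by
  have hsub' := (PySem.Set.issubset_iff a b).mp hsub
  have hab : a.toFinset ⊆ b.toFinset := by
    intro x hx; rw [List.mem_toFinset] at *; exact hsub' x hx
  have hne' : ¬ PySem.Set.equal a b = true := by simp [hne]
  have hss : a.toFinset ⊂ b.toFinset := by
    refine ⟨hab, fun hba => hne' ?_⟩
    rw [PySem.Set.equal_iff]
    intro x
    exact ⟨fun hx => hsub' x hx,
      fun hx => List.mem_toFinset.mp (hba (List.mem_toFinset.mpr hx))⟩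
  have hlt := Finset.card_lt_card hss
  rw [List.toFinset_card_of_nodup ha, List.toFinset_card_of_nodup hb] at hlt
  simp only [PySem.Set.len]
  exact_mod_cast hlt

-- enumerate bookkeeping
theorem pv_mem_E {fs : List (List String)} {q : Int × List String} (h : q ∈ pvE fs) :
    ∃ (k : Nat) (hk : k < fs.length), q = ((k : Int), fs[k]) := by
  rw [pvE, PySem.List.mem_enumerate_iff] at h
  obtain ⟨k, hk, rfl⟩ := h
  exact ⟨k, hk, by simp⟩

theorem pv_E_mem (fs : List (List String)) (k : Nat) (hk : k < fs.length) :
    ((k : Int), fs[k]) ∈ pvE fs := by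
  rw [pvE, PySem.List.mem_enumerate_iff]
  exact ⟨k, hk, by simp⟩

theorem pv_mem_E_snd {fs : List (List String)} {p : Int × List String} (h : p ∈ pvE fs) :
    p.2 ∈ fs := by
  rw [pvE, PySem.List.mem_enumerate_iff] at h
  obtain ⟨k, hk, rfl⟩ := h; exact List.getElem_mem hk
theorem pv_fs_canon {cuts : List (List String)} {d : List String} (h : d ∈ pvFS cuts) :
    PySem.Set.ofList d = d ∧ d.Nodup := by
  rw [pvFS, List.mem_map] at h
  obtain ⟨c, _, rfl⟩ := h
  exact ⟨PySem.Set.ofList_ofList c, PySem.Set.nodup_ofList c⟩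

-- decomposition of pvE fs = done ++ p :: rest
theorem pv_prefix (fs : List (List String)) (done rest : List (Int × List String))
    (p : Int × List String) (h : pvE fs = done ++ p :: rest) :
    ∃ (hn : done.length < fs.length), p = ((done.length : Int), fs[done.length]) ∧
      (∀ q, q ∈ done ↔ ∃ (k : Nat) (hk : k < done.length), q = ((k : Int), fs[k]'(by omega))) := by
  have hlenE : (pvE fs).length = fs.length := PySem.List.length_enumerate fs 0
  have hlen : done.length + (p :: rest).length = fs.length := by
    rw [← hlenE, h]; simp
  simp only [List.length_cons] at hlen
  have hn : done.length < fs.length := by omega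
  have hgetE : ∀ (k : Nat) (hk : k < fs.length),
      (pvE fs)[k]'(by rw [hlenE]; exact hk) = ((k : Int), fs[k]) := by
    intro k hk
    have := PySem.List.getElem_enumerate fs 0 k
      (by rw [PySem.List.length_enumerate]; exact hk)
    simpa [pvE] using this
  have hget_split : ∀ (k : Nat) (hk : k < done.length),
      done[k] = ((k : Int), fs[k]'(by omega)) := by
    intro k hk
    have h1 : k < (pvE fs).length := by rw [hlenE]; omega
    have h2 := List.getElem_of_eq h h1
    rw [List.getElem_append_left hk] at h2
    exact ((hgetE k (by omega)).symm.trans h2).symm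
  refine ⟨hn, ?_, ?_⟩
  · have h1 : done.length < (pvE fs).length := by rw [hlenE]; exact hn
    have h2 := List.getElem_of_eq h h1
    have h3 : (done ++ p :: rest)[done.length]'(by simp) = p := by simp
    rw [h3] at h2
    exact ((hgetE done.length hn).symm.trans h2).symm
  · intro q
    constructor
    · intro hq
      obtain ⟨k, hk, hgq⟩ := List.getElem_of_mem hq
      exact ⟨k, hk, by rw [← hgq, hget_split k hk]⟩
    · rintro ⟨k, hk, rfl⟩
      rw [← hget_split k hk]
      exact List.getElem_mem hk

-- every set of fs has a representative among the first occurrences, no later than itself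
theorem pv_rep (fs : List (List String)) : ∀ k (hk : k < fs.length),
    ∃ q ∈ (pvE fs).filter (pvG1 fs), PySem.Set.equal q.2 (fs[k]) = true ∧ q.1 ≤ (k : Int) := by
  intro k
  induction k using Nat.strong_induction_on with
  | _ k IH =>
    intro hk
    by_cases hg : pvG1 fs ((k : Int), fs[k]) = true
    · refine ⟨((k : Int), fs[k]), ?_, pv_equal_refl _, le_refl _⟩
      rw [List.mem_filter]
      exact ⟨pv_E_mem fs k hk, hg⟩
    · rw [pvG1, List.all_eq_true] at hg
      push_neg at hg
      obtain ⟨q, hqE, hq⟩ := hg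
      have hq' : q.1 < (k : Int) ∧ PySem.Set.equal q.2 (fs[k]) = true := by
        rcases h1 : PySem.Set.equal q.2 (fs[k]) with _ | _ <;>
          rcases h2 : decide (q.1 < (k : Int)) with _ | _ <;>
            simp [h1, h2] at hq ⊢
        exact of_decide_eq_true h2
      obtain ⟨k', hk', rfl⟩ := pv_mem_E hqE
      have hklt : k' < k := by exact_mod_cast (show ((k' : Int)) < (k : Int) from hq'.1)
      obtain ⟨r, hr, hre, hrle⟩ := IH k' hklt hk'
      refine ⟨r, hr, pv_equal_trans hre hq'.2, le_trans hrle ?_⟩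
      exact_mod_cast hklt.le

-- the first occurrences are pairwise set-distinct
theorem pv_uniq_pairwise (fs : List (List String)) :
    ((pvE fs).filter (pvG1 fs)).Pairwise (fun a b => PySem.Set.equal a.2 b.2 = false) := by
  have h0 : (pvE fs).Pairwise (fun p q => p.1 < q.1) := by
    rw [pvE]; exact PySem.List.pairwise_lt_enumerate fs 0
  refine (h0.filter (pvG1 fs)).imp_of_mem ?_
  intro a b ha hb hlt
  have haE : a ∈ pvE fs := (List.mem_filter.mp ha).1
  have hbg : pvG1 fs b = true := (List.mem_filter.mp hb).2
  rw [pvG1, List.all_eq_true] at hbg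
  have := hbg a haE
  rcases h1 : PySem.Set.equal a.2 b.2 with _ | _
  · rfl
  · simp [h1, hlt] at this

-- B's dedup fold builds exactly the first occurrences
theorem pv_uniq_fold (fs : List (List String)) : ∀ (rest done : List (Int × List String)),
    pvE fs = done ++ rest →
    rest.foldl (fun u p => if u.all (fun q => !(PySem.Set.equal p.2 q.2)) then u ++ [p] else u)
      (done.filter (pvG1 fs))
    = (pvE fs).filter (pvG1 fs) := by
  intro rest
  induction rest with
  | nil =>
    intro done h
    rw [List.append_nil] at h
    rw [← h]
    rfl
  | cons p rest IH =>
    intro done h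
    obtain ⟨hn, hp, hmem⟩ := pv_prefix fs done rest p h
    -- the accumulator test equals the first-occurrence predicate at p
    have hiff : pvG1 fs p = true ↔ ∀ q ∈ done, PySem.Set.equal q.2 p.2 = false := by
      constructor
      · intro hg q hq
        obtain ⟨k, hk, rfl⟩ := (hmem q).mp hq
        rw [pvG1, List.all_eq_true] at hg
        have := hg ((k : Int), fs[k]'(by omega)) (pv_E_mem fs k (by omega))
        have hklt : ((k : Int), fs[k]'(by omega)).1 < p.1 := by
          rw [hp]
          show ((k : Int)) < ((done.length : Int))
          exact_mod_cast hk
        rcases h1 : PySem.Set.equal ((k : Int), fs[k]'(by omega)).2 p.2 with _ | _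
        · rfl
        · simp [h1, hklt] at this
      · intro hall
        rw [pvG1, List.all_eq_true]
        intro q hqE
        obtain ⟨k, hk, rfl⟩ := pv_mem_E hqE
        rcases h1 : PySem.Set.equal (fs[k]) p.2 with _ | _
        · simp [h1]
        · have hkd : ((k : Int)) < p.1 → False := by
            intro hlt
            rw [hp] at hlt
            have hlt' : ((k : Int)) < ((done.length : Int)) := hlt
            have hkd' : k < done.length := by exact_mod_cast hlt'
            have := hall ((k : Int), fs[k]'(by omega)) ((hmem _).mpr ⟨k, hkd', rfl⟩)
            simp [h1] at this
          rcases h2 : decide (((k : Int), fs[k]).1 < p.1) with _ | _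
          · simp [h2]
          · exact absurd (of_decide_eq_true h2) hkd
    have htest : ((done.filter (pvG1 fs)).all (fun q => !(PySem.Set.equal p.2 q.2))) = pvG1 fs p := by
      rcases hg : pvG1 fs p with _ | _
      · -- some earlier q in done is set-equal to p; its first occurrence is in the filter
        have : ∃ q ∈ done, PySem.Set.equal q.2 p.2 = true := by
          by_contra hc
          push_neg at hc
          refine absurd (hiff.mpr fun q hq => ?_) (by simp [hg])
          rcases h1 : PySem.Set.equal q.2 p.2 with _ | _
          · rfl
          · exact absurd h1 (hc q hq)
        obtain ⟨q, hq, hqe⟩ := this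
        obtain ⟨k, hk, rfl⟩ := (hmem q).mp hq
        obtain ⟨r, hr, hre, hrle⟩ := pv_rep fs k (by omega)
        have hrdone : r ∈ done := by
          obtain ⟨k', hk', rfl⟩ := pv_mem_E ((List.mem_filter.mp hr).1)
          refine (hmem _).mpr ⟨k', ?_, rfl⟩
          have : ((k' : Int)) ≤ (k : Int) := hrle
          have : k' ≤ k := by exact_mod_cast this
          omega
        have hrf : r ∈ done.filter (pvG1 fs) :=
          List.mem_filter.mpr ⟨hrdone, (List.mem_filter.mp hr).2⟩
        rw [List.all_eq_false]
        refine ⟨r, hrf, ?_⟩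
        have hre' : PySem.Set.equal r.2 p.2 = true := pv_equal_trans hre hqe
        rw [pv_equal_symm] at hre'
        simp [hre']
      · rw [List.all_eq_true]
        intro q hq
        have := hiff.mp hg q (List.mem_filter.mp hq).1
        rw [pv_equal_symm] at this
        simp [this]
    rcases hg : pvG1 fs p with _ | _
    · rw [List.foldl_cons, if_neg (by rw [htest, hg]; simp)]
      have hfe : done.filter (pvG1 fs) = (done ++ [p]).filter (pvG1 fs) := by
        rw [List.filter_append]; simp [hg]
      rw [hfe]
      exact IH (done ++ [p]) (by rw [h]; simp)
    · rw [List.foldl_cons, if_pos (by rw [htest, hg])]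
      have hfe : done.filter (pvG1 fs) ++ [p] = (done ++ [p]).filter (pvG1 fs) := by
        rw [List.filter_append]; simp [hg]
      rw [hfe]
      exact IH (done ++ [p]) (by rw [h]; simp)

-- B's cardinality-ordered sweep keeps exactly the sets with no strict subset in fs
theorem pv_sweep (fs : List (List String)) (hnd : ∀ d ∈ fs, d.Nodup)
    (S : List (Int × List String)) (hperm : S.Perm ((pvE fs).filter (pvG1 fs)))
    (hsort : S.Pairwise (fun a b => PySem.Set.len a.2 ≤ PySem.Set.len b.2)) :
    ∀ (rest done : List (Int × List String)), S = done ++ rest →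
    (∀ r ∈ done, ∃ k ∈ done.filter (fun q => pvG2 fs q.2), PySem.Set.issubset k.2 r.2 = true) →
    rest.foldl (fun kept p =>
        if kept.any (fun q => PySem.Set.issubset q.2 p.2) then kept else kept ++ [p])
      (done.filter (fun q => pvG2 fs q.2))
    = S.filter (fun q => pvG2 fs q.2) := by
  have hsymm : ∀ {x y : Int × List String},
      PySem.Set.equal x.2 y.2 = false → PySem.Set.equal y.2 x.2 = false := by
    intro x y hxy; rw [pv_equal_symm]; exact hxy
  have hdist : S.Pairwise (fun a b => PySem.Set.equal a.2 b.2 = false) :=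
    (hperm.pairwise_iff hsymm).mpr (pv_uniq_pairwise fs)
  have hSfs : ∀ r ∈ S, r.2 ∈ fs := by
    intro r hr
    exact pv_mem_E_snd (List.mem_filter.mp ((hperm.mem_iff).mp hr)).1
  have hrep : ∀ d ∈ fs, ∃ r ∈ S, PySem.Set.equal r.2 d = true := by
    intro d hd
    obtain ⟨k, hk, hdk⟩ := List.getElem_of_mem hd
    subst hdk
    obtain ⟨r, hr, hre, _⟩ := pv_rep fs k hk
    exact ⟨r, (hperm.mem_iff).mpr hr, hre⟩
  intro rest
  induction rest with
  | nil =>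
    intro done h _
    rw [List.append_nil] at h
    rw [← h]
    rfl
  | cons p rest IH =>
    intro done h hinv
    have hpS : p ∈ S := by rw [h]; simp
    have hcross : ∀ a ∈ done, ∀ b ∈ p :: rest, PySem.Set.equal a.2 b.2 = false := by
      have := hdist
      rw [h, List.pairwise_append] at this
      exact this.2.2
    have hsortc : ∀ b ∈ rest, PySem.Set.len p.2 ≤ PySem.Set.len b.2 := by
      have := hsort
      rw [h, List.pairwise_append] at this
      exact (List.pairwise_cons.mp this.2.1).1
    have htest : ((done.filter (fun q => pvG2 fs q.2)).any
        (fun q => PySem.Set.issubset q.2 p.2)) = !(pvG2 fs p.2) := by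
      rcases hg : pvG2 fs p.2 with _ | _
      · -- some strict subset of p.2 exists in fs: a kept set is inside p.2
        simp only [Bool.not_false]
        rw [pvG2, List.all_eq_false] at hg
        obtain ⟨d, hd, hdp⟩ := hg
        have hsub : PySem.Set.issubset d p.2 = true ∧ PySem.Set.equal d p.2 = false := by
          rcases h1 : PySem.Set.issubset d p.2 with _ | _ <;>
            rcases h2 : PySem.Set.equal d p.2 with _ | _ <;> simp [h1, h2] at hdp ⊢
        obtain ⟨r, hrS, hre⟩ := hrep d hd
        have hrsub : PySem.Set.issubset r.2 p.2 = true :=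
          pv_sub_trans (pv_sub_of_equal hre) hsub.1
        have hrne : PySem.Set.equal r.2 p.2 = false := by
          rcases h' : PySem.Set.equal r.2 p.2 with _ | _
          · rfl
          · exfalso
            have : PySem.Set.equal d p.2 = true :=
              pv_equal_trans (by rw [pv_equal_symm]; exact hre) h'
            rw [this] at hsub
            exact absurd hsub.2 (by simp)
        have hrdone : r ∈ done := by
          have hrS' := hrS
          rw [h] at hrS'
          rcases List.mem_append.mp hrS' with h1 | h1
          · exact h1
          · exfalso
            have hlenle : PySem.Set.len p.2 ≤ PySem.Set.len r.2 := by
              rcases List.mem_cons.mp h1 with rfl | h2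
              · exact le_refl _
              · exact hsortc r h2
            have hlt := pv_strict_len (hnd r.2 (hSfs r hrS)) (hnd p.2 (hSfs p hpS)) hrsub hrne
            omega
        obtain ⟨k, hk, hksub⟩ := hinv r hrdone
        rw [List.any_eq_true]
        exact ⟨k, hk, pv_sub_trans hksub hrsub⟩
      · -- p.2 has no strict subset: nothing kept is inside it
        simp only [Bool.not_true]
        rw [List.any_eq_false]
        intro q hq
        have hqdone : q ∈ done := (List.mem_filter.mp hq).1
        have hqne : PySem.Set.equal q.2 p.2 = false := hcross q hqdone p (by simp)
        intro hqsub
        rw [pvG2, List.all_eq_true] at hg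
        have := hg q.2 (hSfs q (by rw [h]; exact List.mem_append_left _ hqdone))
        simp [hqsub, hqne] at this
    rcases hg : pvG2 fs p.2 with _ | _
    · rw [List.foldl_cons, if_pos (by rw [htest, hg]; rfl)]
      have hfe : done.filter (fun q => pvG2 fs q.2) = (done ++ [p]).filter (fun q => pvG2 fs q.2) := by
        rw [List.filter_append]; simp [hg]
      rw [hfe]
      apply IH (done ++ [p]) (by rw [h]; simp)
      intro r hr
      rcases List.mem_append.mp hr with h1 | h1
      · obtain ⟨k, hk, hs⟩ := hinv r h1
        exact ⟨k, by rw [← hfe]; exact hk, hs⟩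
      · have hrp : r = p := by simpa using h1
        rw [hrp]
        have := htest
        rw [hg, Bool.not_false, List.any_eq_true] at this
        obtain ⟨k, hk, hs⟩ := this
        exact ⟨k, by rw [← hfe]; exact hk, hs⟩
    · rw [List.foldl_cons, if_neg (by rw [htest, hg]; simp)]
      have hfe : done.filter (fun q => pvG2 fs q.2) ++ [p] = (done ++ [p]).filter (fun q => pvG2 fs q.2) := by
        rw [List.filter_append]; simp [hg]
      rw [hfe]
      apply IH (done ++ [p]) (by rw [h]; simp)
      intro r hr
      rcases List.mem_append.mp hr with h1 | h1
      · obtain ⟨k, hk, hs⟩ := hinv r h1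
        exact ⟨k, by rw [← hfe]; exact List.mem_append_left _ hk, hs⟩
      · have hrp : r = p := by simpa using h1
        rw [hrp]
        refine ⟨p, ?_, pv_sub_refl _⟩
        rw [← hfe]
        apply List.mem_append_right
        simp [hg]

-- A's dominated test is the negation of pvGood, on entries of pvE fs
theorem pv_dom (fs : List (List String)) (p : Int × List String) (hp : p ∈ pvE fs) :
    ((pvE fs).any (fun q =>
      if q.1 == p.1 then false
      else PySem.Set.issubset q.2 p.2 && (!(PySem.Set.equal q.2 p.2) || decide (q.1 < p.1))))
    = !(pvGood fs p) := by
  obtain ⟨i, hi, rfl⟩ := pv_mem_E hp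
  rcases hg2 : pvG2 fs (fs[i]) with _ | _
  · -- a strict subset exists somewhere in fs: A's scan finds it
    have hgood : pvGood fs ((i : Int), fs[i]) = false := by simp [pvGood, hg2]
    rw [hgood, Bool.not_false, List.any_eq_true]
    rw [pvG2, List.all_eq_false] at hg2
    obtain ⟨d, hd, hdp⟩ := hg2
    have hsub : PySem.Set.issubset d (fs[i]) = true ∧ PySem.Set.equal d (fs[i]) = false := by
      rcases h1 : PySem.Set.issubset d (fs[i]) with _ | _ <;>
        rcases h2 : PySem.Set.equal d (fs[i]) with _ | _ <;> simp [h1, h2] at hdp ⊢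
    obtain ⟨k, hk, hdk⟩ := List.getElem_of_mem hd
    subst hdk
    have hki : k ≠ i := by
      rintro rfl
      rw [pv_equal_refl] at hsub
      exact absurd hsub.2 (by simp)
    refine ⟨((k : Int), fs[k]), pv_E_mem fs k hk, ?_⟩
    have hne : ((((k : Int), (fs[k] : List String)).1 == ((i : Int), (fs[i] : List String)).1)) = false := by
      simp only [beq_eq_false_iff_ne, ne_eq, Nat.cast_inj]
      exact_mod_cast hki
    simp [hne, hsub.1, hsub.2]
  · rcases hg1 : pvG1 fs ((i : Int), fs[i]) with _ | _
    · -- an earlier occurrence of the same set exists: A's scan finds it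
      have hgood : pvGood fs ((i : Int), fs[i]) = false := by simp [pvGood, hg1]
      rw [hgood, Bool.not_false, List.any_eq_true]
      rw [pvG1, List.all_eq_false] at hg1
      obtain ⟨q, hq, hqp⟩ := hg1
      have hq' : q.1 < (i : Int) ∧ PySem.Set.equal q.2 (fs[i]) = true := by
        rcases h1 : PySem.Set.equal q.2 (fs[i]) with _ | _ <;>
          rcases h2 : decide (q.1 < ((i : Int), (fs[i] : List String)).1) with _ | _ <;>
            simp [h1, h2] at hqp ⊢
        exact of_decide_eq_true h2
      refine ⟨q, hq, ?_⟩
      have hne : ((q.1 == ((i : Int), (fs[i] : List String)).1)) = false := by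
        simp only [beq_eq_false_iff_ne, ne_eq]
        intro he
        exact absurd hq'.1 (by rw [he]; exact lt_irrefl _)
      have hsubq := pv_sub_of_equal hq'.2
      simp [hne, hsubq, hq'.1]
    · -- p is good: no scan entry fires
      have hgood : pvGood fs ((i : Int), fs[i]) = true := by simp [pvGood, hg1, hg2]
      rw [hgood, Bool.not_true, List.any_eq_false]
      intro q hq
      rcases hb : ((q.1 == ((i : Int), (fs[i] : List String)).1)) with _ | _
      · simp only [hb, Bool.false_eq_true, if_false]
        intro hterm
        rw [Bool.and_eq_true] at hterm
        rcases heq : PySem.Set.equal q.2 (fs[i]) with _ | _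
        · rw [pvG2, List.all_eq_true] at hg2
          have := hg2 q.2 (pv_mem_E_snd hq)
          simp [hterm.1, heq] at this
        · have hlt : decide (q.1 < ((i : Int), (fs[i] : List String)).1) = true := by
            have h := hterm.2
            rw [Bool.or_eq_true] at h
            rcases h with h | h
            · simp [heq] at h
            · exact h
          rw [pvG1, List.all_eq_true] at hg1
          have := hg1 q hq
          simp [heq, of_decide_eq_true hlt] at this
      · simp [hb]

-- A's final pass removes nothing from a pairwise set-distinct list of canonical lists
theorem pv_dedup : ∀ (l out seen : List (List String)),
    (∀ a ∈ l, PySem.Set.ofList a = a) →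
    (∀ a ∈ l, ∀ s ∈ seen, PySem.Set.equal s a = false) →
    l.Pairwise (fun a b => PySem.Set.equal a b = false) →
    (l.foldl (fun (acc : List (List String) × List (List String)) c =>
        let f := PySem.Set.ofList c
        if acc.2.any (fun g => PySem.Set.equal g f) then acc
        else (acc.1 ++ [c], acc.2 ++ [f])) (out, seen)).1 = out ++ l := by
  intro l
  induction l with
  | nil => intros; simp
  | cons a t IH =>
    intro out seen hcanon hseen hpw
    have ha : PySem.Set.ofList a = a := hcanon a (by simp)
    have hmiss : (seen.any (fun g => PySem.Set.equal g a)) = false := by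
      rw [List.any_eq_false]
      intro g hg
      simp [hseen a (by simp) g hg]
    rw [List.foldl_cons]
    have hstep : (let f := PySem.Set.ofList a
        if ((out, seen).2.any fun g => PySem.Set.equal g f) = true then (out, seen)
        else ((out, seen).1 ++ [a], (out, seen).2 ++ [f])) = (out ++ [a], seen ++ [a]) := by
      simp only [ha, hmiss]
      simp
    rw [hstep]
    rw [IH (out ++ [a]) (seen ++ [a]) (fun b hb => hcanon b (by simp [hb]))
      ?_ (List.pairwise_cons.mp hpw).2]
    · simp
    · intro b hb g hg
      rcases List.mem_append.mp hg with h1 | h1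
      · exact hseen b (by simp [hb]) g h1
      · have : g = a := by simpa using h1
        subst this
        exact (List.pairwise_cons.mp hpw).1 b hb

-- A's skip-or-append loop is filter-then-map
theorem pv_foldl_skip_if {α β : Type} (D : α → Bool) (f : α → β) (l : List α) (acc : List β) :
    l.foldl (fun keep p => if D p then keep else keep ++ [f p]) acc
    = acc ++ (l.filter (fun p => !D p)).map f := by
  have h := PySem.List.foldl_append_if (fun p => !D p) f l acc
  have hfe : (fun (keep : List β) p => if D p then keep else keep ++ [f p])
      = (fun acc x => if (!D x) = true then acc ++ [f x] else acc) := by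
    funext k p
    rcases hD : D p with _ | _ <;> simp [hD]
  rw [hfe, h]

theorem pv_filter_good (fs : List (List String)) :
    (pvE fs).filter (pvGood fs)
    = ((pvE fs).filter (pvG1 fs)).filter (fun q => pvG2 fs q.2) := by
  rw [List.filter_filter]
  exact List.filter_congr (fun x _ => rfl)

theorem pv_map_canon (cuts : List (List String)) :
    ((pvE (pvFS cuts)).filter (pvGood (pvFS cuts))).map (fun p => PySem.Set.ofList p.2)
    = ((pvE (pvFS cuts)).filter (pvGood (pvFS cuts))).map (·.2) :=
  List.map_congr_left fun p hp =>
    (pv_fs_canon (pv_mem_E_snd (List.mem_filter.mp hp).1)).1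

-- both ports compute the canonical result
theorem pv_A (cuts : List (List String)) :
    minimalize_cuts cuts = ((pvE (pvFS cuts)).filter (pvGood (pvFS cuts))).map (·.2) := by
  simp only [minimalize_cuts]
  rw [show List.map (fun c => PySem.Set.ofList c) cuts = pvFS cuts from rfl]
  rw [show PySem.List.enumerate (pvFS cuts) 0 = pvE (pvFS cuts) from rfl]
  rw [pv_foldl_skip_if (fun p => (pvE (pvFS cuts)).any (fun q =>
      if q.1 == p.1 then false
      else PySem.Set.issubset q.2 p.2 && (!(PySem.Set.equal q.2 p.2) || decide (q.1 < p.1))))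
    (fun p => PySem.Set.ofList p.2) (pvE (pvFS cuts)) []]
  rw [List.nil_append]
  rw [List.filter_congr (fun x hx => by
    rw [pv_dom (pvFS cuts) x hx, Bool.not_not])]
  rw [pv_map_canon]
  have hpw : (((pvE (pvFS cuts)).filter (pvGood (pvFS cuts))).map (·.2)).Pairwise
      (fun a b => PySem.Set.equal a b = false) := by
    rw [List.pairwise_map, pv_filter_good]
    exact (pv_uniq_pairwise (pvFS cuts)).filter _
  have hcanon : ∀ a ∈ ((pvE (pvFS cuts)).filter (pvGood (pvFS cuts))).map (·.2),
      PySem.Set.ofList a = a := by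
    intro a ha
    rw [List.mem_map] at ha
    obtain ⟨p, hp, rfl⟩ := ha
    exact (pv_fs_canon (pv_mem_E_snd (List.mem_filter.mp hp).1)).1
  have := pv_dedup (((pvE (pvFS cuts)).filter (pvGood (pvFS cuts))).map (·.2)) [] []
    hcanon (fun a _ s hs => absurd hs (List.not_mem_nil)) hpw
  rw [this, List.nil_append]

theorem pv_B (cuts : List (List String)) :
    minimalize_cuts_alt cuts = ((pvE (pvFS cuts)).filter (pvGood (pvFS cuts))).map (·.2) := by
  have hnd : ∀ d ∈ pvFS cuts, d.Nodup := fun d hd => (pv_fs_canon hd).2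
  simp only [minimalize_cuts_alt]
  rw [show List.map (fun c => PySem.Set.ofList c) cuts = pvFS cuts from rfl]
  rw [show PySem.List.enumerate (pvFS cuts) 0 = pvE (pvFS cuts) from rfl]
  have h1 := pv_uniq_fold (pvFS cuts) (pvE (pvFS cuts)) [] rfl
  simp only [List.filter_nil] at h1
  rw [h1]
  have hperm := PySem.List.sorted_perm ((pvE (pvFS cuts)).filter (pvG1 (pvFS cuts)))
    (fun p => PySem.Set.len p.2) false
  have hsort := PySem.List.sorted_pairwise ((pvE (pvFS cuts)).filter (pvG1 (pvFS cuts)))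
    (fun p => PySem.Set.len p.2)
  have h2 := pv_sweep (pvFS cuts) hnd
    (PySem.List.sorted ((pvE (pvFS cuts)).filter (pvG1 (pvFS cuts))) (fun p => PySem.Set.len p.2))
    hperm hsort
    (PySem.List.sorted ((pvE (pvFS cuts)).filter (pvG1 (pvFS cuts))) (fun p => PySem.Set.len p.2))
    [] rfl (fun r hr => absurd hr (List.not_mem_nil))
  simp only [List.filter_nil] at h2
  rw [h2]
  have hperm2 : ((pvE (pvFS cuts)).filter (pvGood (pvFS cuts))).Perm
      ((PySem.List.sorted ((pvE (pvFS cuts)).filter (pvG1 (pvFS cuts)))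
        (fun p => PySem.Set.len p.2)).filter (fun q => pvG2 (pvFS cuts) q.2)) := by
    rw [pv_filter_good]
    exact (hperm.filter _).symm
  have hpw2 : ((pvE (pvFS cuts)).filter (pvGood (pvFS cuts))).Pairwise
      (fun a b => a.1 < b.1) :=
    (PySem.List.pairwise_lt_enumerate (pvFS cuts) 0).filter _
  rw [PySem.List.sorted_eq_of_perm_of_pairwise_lt _ _ (fun p => p.1) hperm2 hpw2]
  rw [pv_map_canon]

-- ===== VERDICT (by name: the statement is the Claim_ definition above) =====
theorem minimalize_cuts_spec : Claim_equal_minimalize_cuts := by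
  intro cuts _
  show minimalize_cuts cuts = minimalize_cuts_alt cuts
  rw [pv_A, pv_B]
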